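-- pv_equiv track=rewrite | github.com/oereo/Algorithm_for_CodingTest | Sehoon/Beakjoon/구현/21918_전구.py | get_final_bulb_state
-- ===== SOURCE A (Python) =====
-- BULB_STATE_COMMAND_1 = 1
--
-- BULB_STATE_COMMAND_2 = 2
--
-- BULB_STATE_COMMAND_3 = 3
--
-- BULB_STATE_COMMAND_4 = 4
--
-- TURN_ON = 1
--
-- TURN_OFF = 0
--
-- def get_final_bulb_state(bulb_state_commands:list, bulb:list):
--     for bulb_state in bulb_state_commands:
--         if bulb_state[0] == BULB_STATE_COMMAND_1:
--             bulb[bulb_state[1]-1] = bulb_state[2]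
--         if bulb_state[0] == BULB_STATE_COMMAND_2:
--             for i in range(bulb_state[1]-1, bulb_state[2]):
--                 if bulb[i] == TURN_ON:
--                     bulb[i] = TURN_OFF
--                 elif bulb[i] == TURN_OFF:
--                     bulb[i] = TURN_ON
--         if bulb_state[0] == BULB_STATE_COMMAND_3:
--             bulb[bulb_state[1]-1:bulb_state[2]] = [TURN_OFF]*(bulb_state[2] - bulb_state[1]+1)
--         if bulb_state[0] == BULB_STATE_COMMAND_4:
--             bulb[bulb_state[1]-1:bulb_state[2]] = [TURN_ON]*(bulb_state[2] - bulb_state[1]+1)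
--     return bulb
-- ===== SOURCE B (Python) =====
-- TURN_ON = 1
--
-- TURN_OFF = 0
--
-- def get_final_bulb_state(bulb_state_commands: list, bulb: list):
--     # Functional per-position evaluation: scan the commands backwards, stop at the
--     # last assignment covering the position, then apply the parity of the later
--     # toggles (a toggle only ever flips a cell holding 0 or 1).
--     # Unlike A, this does not mutate `bulb` in place.
--     n = len(bulb)
--     rev = bulb_state_commands[::-1]
--
--     def adjust(v, flips):
--         if flips % 2 == 1 and (v == 0 or v == 1):
--             return 1 - v
--         return v
--
--     def value_at(j):
--         flips = 0
--         for c in rev: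
--             t = c[0]
--             if t == 1 and c[1] - 1 == j:
--                 return adjust(c[2], flips)
--             if t == 2 and c[1] - 1 <= j < c[2]:
--                 flips += 1
--             if (t == 3 or t == 4) and c[1] - 1 <= j < c[2]:
--                 return adjust(t - 3, flips)
--         return adjust(bulb[j], flips)
--
--     return [value_at(j) for j in range(n)]
-- ===== Notes on version B (the rewrite author's own statement) =====
-- stated objective: alternative
-- what changed: A mutates the bulb list in place, applying each command forward (point set, elementwise toggle loop, slice assignment); B never mutates: it computes each position's final value independently by scanning the commands backwards, stopping at the last assignment covering that position and applying the parity of the toggles seen since.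
-- outside the precondition, e.g. on get_final_bulb_state([[1, 0, 1]], [0, 0]): A returns [0, 1], B returns [0, 0]; on get_final_bulb_state([[3, 2, 5]], [1, 1]): A returns [1, 0, 0, 0, 0], B returns [1, 0]; on get_final_bulb_state([[4, 1, -1]], [0, 0, 0]): A returns [0], B returns [0, 0, 0]
import Mathlib
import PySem

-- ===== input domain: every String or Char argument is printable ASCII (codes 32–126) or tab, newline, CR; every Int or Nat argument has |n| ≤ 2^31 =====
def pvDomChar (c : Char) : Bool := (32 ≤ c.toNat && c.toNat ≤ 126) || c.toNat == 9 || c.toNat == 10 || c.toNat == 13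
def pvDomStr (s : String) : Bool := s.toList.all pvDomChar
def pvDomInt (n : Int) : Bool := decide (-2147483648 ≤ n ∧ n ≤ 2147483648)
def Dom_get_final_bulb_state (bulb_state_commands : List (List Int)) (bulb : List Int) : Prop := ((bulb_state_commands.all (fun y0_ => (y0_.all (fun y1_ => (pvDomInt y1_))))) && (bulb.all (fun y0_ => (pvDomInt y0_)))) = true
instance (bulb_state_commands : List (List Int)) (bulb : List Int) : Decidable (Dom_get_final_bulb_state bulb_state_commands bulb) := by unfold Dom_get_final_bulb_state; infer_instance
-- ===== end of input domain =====

-- B replaces A's forward in-place mutation by a functional per-position backward scan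
-- (stop at the last assignment covering the position, then apply toggle parity); the
-- equivalence is about the RETURN value only: A mutates `bulb` in place, B does not.

-- ===== PORT A =====
-- body of the `for i in range(...)` loop of command 2; `bulb[i]` read/written via the
-- total pyGetD/pySetD forms — exact wherever the Python read does not raise (Pre_)
def pvToggleStep (b : List Int) (i : Int) : List Int :=
  if PySem.List.pyGetD b i 0 = 1 then PySem.List.pySetD b i 0
  else if PySem.List.pyGetD b i 0 = 0 then PySem.List.pySetD b i 1
  else b

-- one iteration of A's command loop; the four `if`s are sequential as in the Python.
-- `bulb_state[k]` is read via pyGetD (exact under Pre_: read only when the element exists);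
-- the slice assignment `bulb[l-1:r] = [x]*(r-l+1)` is ported by hand through Python's
-- slice-index resolution (clampIdx): result = b[:s] ++ replacement ++ b[max(s,e):] — exact
-- for every integer l, r.
def pvStepA (b : List Int) (bulb_state : List Int) : List Int :=
  let t := PySem.List.pyGetD bulb_state 0 0
  let l := PySem.List.pyGetD bulb_state 1 0
  let r := PySem.List.pyGetD bulb_state 2 0
  let b1 := if t = 1 then PySem.List.pySetD b (l - 1) r else b
  let b2 := if t = 2 then (PySem.List.pyRange (l - 1) r 1).foldl pvToggleStep b1 else b1
  let b3 := if t = 3 then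
      b2.take (PySem.List.clampIdx b2.length (l - 1)) ++ List.replicate (r - l + 1).toNat 0 ++
        b2.drop (max (PySem.List.clampIdx b2.length (l - 1)) (PySem.List.clampIdx b2.length r))
    else b2
  if t = 4 then
      b3.take (PySem.List.clampIdx b3.length (l - 1)) ++ List.replicate (r - l + 1).toNat 1 ++
        b3.drop (max (PySem.List.clampIdx b3.length (l - 1)) (PySem.List.clampIdx b3.length r))
    else b3

def get_final_bulb_state (bulb_state_commands : List (List Int)) (bulb : List Int) : List Int :=
  bulb_state_commands.foldl pvStepA bulb

-- ===== PORT B =====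
-- `adjust(v, flips)` of Source B: a toggle only ever flips a cell holding 0 or 1
def pvAdjust (v flips : Int) : Int :=
  if PySem.Int.mod flips 2 = 1 ∧ (v = 0 ∨ v = 1) then 1 - v else v

-- `value_at(j)` of Source B: scan the reversed command list carrying the flip count
def pvValueAt (bulb : List Int) (j : Int) : List (List Int) → Int → Int
  | [], flips => pvAdjust (PySem.List.pyGetD bulb j 0) flips
  | c :: rest, flips =>
    let t := PySem.List.pyGetD c 0 0
    if t = 1 ∧ PySem.List.pyGetD c 1 0 - 1 = j then
      pvAdjust (PySem.List.pyGetD c 2 0) flips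
    else if t = 2 ∧ PySem.List.pyGetD c 1 0 - 1 ≤ j ∧ j < PySem.List.pyGetD c 2 0 then
      pvValueAt bulb j rest (flips + 1)
    else if (t = 3 ∨ t = 4) ∧ PySem.List.pyGetD c 1 0 - 1 ≤ j ∧ j < PySem.List.pyGetD c 2 0 then
      pvAdjust (t - 3) flips
    else pvValueAt bulb j rest flips

def get_final_bulb_state_alt (bulb_state_commands : List (List Int)) (bulb : List Int) : List Int :=
  let n : Int := bulb.length
  let rev := (PySem.List.slice? bulb_state_commands none none (-1)).getD []   -- cmds[::-1]
  (PySem.List.pyRange 0 n 1).map (fun j => pvValueAt bulb j rev 0)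

-- ===== PRECONDITION & SPEC =====
def pvOkCmd (n : Int) (c : List Int) : Bool :=
  decide (c ≠ [] ∧
    ((PySem.List.pyGetD c 0 0 = 1 ∨ PySem.List.pyGetD c 0 0 = 2 ∨ PySem.List.pyGetD c 0 0 = 3 ∨
        PySem.List.pyGetD c 0 0 = 4) →
      3 ≤ c.length ∧
      (PySem.List.pyGetD c 0 0 = 1 →
        1 ≤ PySem.List.pyGetD c 1 0 ∧ PySem.List.pyGetD c 1 0 ≤ n) ∧
      (PySem.List.pyGetD c 0 0 = 2 →
        PySem.List.pyGetD c 2 0 < PySem.List.pyGetD c 1 0 ∨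
          (1 ≤ PySem.List.pyGetD c 1 0 ∧ PySem.List.pyGetD c 1 0 ≤ PySem.List.pyGetD c 2 0 ∧
            PySem.List.pyGetD c 2 0 ≤ n)) ∧
      ((PySem.List.pyGetD c 0 0 = 3 ∨ PySem.List.pyGetD c 0 0 = 4) →
        (0 ≤ PySem.List.pyGetD c 2 0 ∧ PySem.List.pyGetD c 2 0 < PySem.List.pyGetD c 1 0) ∨
          (1 ≤ PySem.List.pyGetD c 1 0 ∧ PySem.List.pyGetD c 1 0 ≤ PySem.List.pyGetD c 2 0 ∧
            PySem.List.pyGetD c 2 0 ≤ n))))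

-- Pre_ restricts every effective command [t, l, r, …] (t ∈ {1,2,3,4}) to the problem's
-- (Baekjoon 21918) guaranteed index format — in-range positive indices, range commands either
-- empty (r < l) or with 1 ≤ l ≤ r ≤ len(bulb) — and requires every command list to be
-- non-empty and long enough to be read; outside it A raises (IndexError) or returns values
-- produced by Python's negative-index wraparound / length-changing slice assignment, accidents
-- of A's indexing that B does not reproduce.  Commands whose tag is not 1–4 are no-ops and
-- are admitted unrestricted.
def Pre_get_final_bulb_state (bulb_state_commands : List (List Int)) (bulb : List Int) : Prop :=
  bulb_state_commands.all (pvOkCmd (bulb.length : Int)) = true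

instance (bulb_state_commands : List (List Int)) (bulb : List Int) : Decidable (Pre_get_final_bulb_state bulb_state_commands bulb) := by
  unfold Pre_get_final_bulb_state; infer_instance

def pvWitness_get_final_bulb_state : List (List Int) × List Int :=
  ([[1, 1, 1], [2, 1, 2], [3, 1, 1], [4, 2, 2], [7, -5]], [0, 1])

def Spec_get_final_bulb_state (bulb_state_commands : List (List Int)) (bulb : List Int) (out : List Int) : Prop := out = get_final_bulb_state_alt bulb_state_commands bulb
instance (bulb_state_commands : List (List Int)) (bulb : List Int) (out : List Int) : Decidable (Spec_get_final_bulb_state bulb_state_commands bulb out) := by unfold Spec_get_final_bulb_state; infer_instance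

-- ===== CLAIM (what is proved, stated in full; the proofs are below) =====
def Claim_equal_get_final_bulb_state : Prop := ∀ (bulb_state_commands : List (List Int)) (bulb : List Int), Dom_get_final_bulb_state bulb_state_commands bulb → Pre_get_final_bulb_state bulb_state_commands bulb → Spec_get_final_bulb_state bulb_state_commands bulb (get_final_bulb_state bulb_state_commands bulb)

-- ===== LEMMAS AND PROOFS =====

-- proof-side abbreviation: what command 2 does to one cell
def pvToggle (x : Int) : Int := if x = 1 then 0 else if x = 0 then 1 else x

lemma pvGetD_toNat (xs : List Int) (i d : Int) (h : 0 ≤ i) :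
    PySem.List.pyGetD xs i d = xs.getD i.toNat d :=
  PySem.List.pyGetD_of_nonneg xs d h

lemma pvGetD_set (b : List Int) (m k : Nat) (v d : Int) :
    (b.set m v).getD k d = if m = k ∧ k < b.length then v else b.getD k d := by
  simp only [List.getD_eq_getElem?_getD, List.getElem?_set]
  split_ifs <;> simp_all

lemma pvSet_get (b : List Int) (i j v : Int) (hi0 : 0 ≤ i) (hj0 : 0 ≤ j)
    (hj : j < (b.length : Int)) :
    PySem.List.pyGetD (PySem.List.pySetD b i v) j 0 =
      if j = i then v else PySem.List.pyGetD b j 0 := by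
  rw [PySem.List.pySetD_of_nonneg b v hi0, pvGetD_toNat _ j 0 hj0, pvGetD_set,
      pvGetD_toNat b j 0 hj0]
  by_cases hji : j = i
  · rw [if_pos ⟨by omega, by omega⟩, if_pos hji]
  · rw [if_neg (by rintro ⟨h1, h2⟩; exact hji (by omega)), if_neg hji]

lemma pvToggleStep_length (b : List Int) (i : Int) :
    (pvToggleStep b i).length = b.length := by
  unfold pvToggleStep; split_ifs <;> simp [PySem.List.length_pySetD]

lemma pvToggleStep_get (b : List Int) (i j : Int) (hi0 : 0 ≤ i) (hi : i < (b.length : Int))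
    (hj0 : 0 ≤ j) (hj : j < (b.length : Int)) :
    PySem.List.pyGetD (pvToggleStep b i) j 0 =
      if j = i then pvToggle (PySem.List.pyGetD b j 0) else PySem.List.pyGetD b j 0 := by
  by_cases hji : j = i
  · subst hji
    unfold pvToggleStep pvToggle
    by_cases hb1 : PySem.List.pyGetD b j 0 = 1
    · rw [if_pos hb1, pvSet_get b j j 0 hj0 hj0 hj, if_pos rfl, if_pos rfl, if_pos hb1]
    · by_cases hb0 : PySem.List.pyGetD b j 0 = 0
      · rw [if_neg hb1, if_pos hb0, pvSet_get b j j 1 hj0 hj0 hj, if_pos rfl, if_pos rfl,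
            if_neg hb1, if_pos hb0]
      · rw [if_neg hb1, if_neg hb0, if_pos rfl, if_neg hb1, if_neg hb0]
  · unfold pvToggleStep
    rw [if_neg hji]
    split_ifs with h1 h2
    · rw [pvSet_get b i j 0 hi0 hj0 hj, if_neg hji]
    · rw [pvSet_get b i j 1 hi0 hj0 hj, if_neg hji]
    · rfl

lemma pvFoldToggle_length (is : List Int) (b : List Int) :
    (is.foldl pvToggleStep b).length = b.length := by
  induction is generalizing b with
  | nil => rfl
  | cons i is ih => simp [List.foldl_cons, ih, pvToggleStep_length]

lemma pvToggleRange_get_aux (k : Nat) : ∀ (b : List Int) (a r j : Int),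
    (r - a).toNat = k → 0 ≤ a → r ≤ (b.length : Int) → 0 ≤ j → j < (b.length : Int) →
    PySem.List.pyGetD ((PySem.List.pyRange a r 1).foldl pvToggleStep b) j 0 =
      if a ≤ j ∧ j < r then pvToggle (PySem.List.pyGetD b j 0) else PySem.List.pyGetD b j 0 := by
  induction k with
  | zero =>
    intro b a r j hk ha hr hj0 hj
    rw [PySem.List.pyRange_one_eq_nil (by omega)]
    rw [if_neg (by omega)]
    rfl
  | succ k ih =>
    intro b a r j hk ha hr hj0 hj
    have hlt : a < r := by omega
    have hlen : (pvToggleStep b a).length = b.length := pvToggleStep_length b a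
    have hcast : ((pvToggleStep b a).length : Int) = (b.length : Int) := by exact_mod_cast hlen
    rw [PySem.List.pyRange_one_cons hlt]
    simp only [List.foldl_cons]
    rw [ih (pvToggleStep b a) (a + 1) r j (by omega) (by omega) (by rw [hcast]; exact hr) hj0
      (by rw [hcast]; exact hj)]
    rw [pvToggleStep_get b a j ha (by omega) hj0 hj]
    by_cases hja : j = a
    · subst hja
      rw [if_pos rfl, if_neg (by omega), if_pos (by omega)]
    · rw [if_neg hja]
      by_cases hc : a + 1 ≤ j ∧ j < r
      · rw [if_pos hc, if_pos (by omega)]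
      · rw [if_neg hc, if_neg (by omega)]

lemma pvToggleRange_get (b : List Int) (a r j : Int) (ha : 0 ≤ a) (hr : r ≤ (b.length : Int))
    (hj0 : 0 ≤ j) (hj : j < (b.length : Int)) :
    PySem.List.pyGetD ((PySem.List.pyRange a r 1).foldl pvToggleStep b) j 0 =
      if a ≤ j ∧ j < r then pvToggle (PySem.List.pyGetD b j 0) else PySem.List.pyGetD b j 0 :=
  pvToggleRange_get_aux (r - a).toNat b a r j rfl ha hr hj0 hj

lemma pvClampIdx_mono (n : Nat) (a b : Int) (h0 : 0 ≤ a) (h : a ≤ b) :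
    PySem.List.clampIdx n a ≤ PySem.List.clampIdx n b := by
  unfold PySem.List.clampIdx
  split_ifs <;> omega

lemma pvClampIdx_eq_toNat (n : Nat) (k : Int) (h0 : 0 ≤ k) (h1 : k ≤ (n : Int)) :
    PySem.List.clampIdx n k = k.toNat := by
  unfold PySem.List.clampIdx
  split_ifs <;> omega

lemma pvSliceAssign_length (b : List Int) (l r x : Int) (h1 : 1 ≤ l) (h2 : l ≤ r)
    (h3 : r ≤ (b.length : Int)) :
    (b.take (l - 1).toNat ++ List.replicate (r - l + 1).toNat x ++ b.drop r.toNat).length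
      = b.length := by
  simp; omega

lemma pvSliceAssign_get (b : List Int) (l r x j : Int) (h1 : 1 ≤ l) (h2 : l ≤ r)
    (h3 : r ≤ (b.length : Int)) (hj0 : 0 ≤ j) (hj : j < (b.length : Int)) :
    PySem.List.pyGetD (b.take (l - 1).toNat ++ List.replicate (r - l + 1).toNat x ++ b.drop r.toNat) j 0
      = if l - 1 ≤ j ∧ j < r then x else PySem.List.pyGetD b j 0 := by
  have hta : (b.take (l - 1).toNat).length = (l - 1).toNat := by simp; omega
  rw [pvGetD_toNat _ j 0 hj0, pvGetD_toNat b j 0 hj0]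
  by_cases hc : l - 1 ≤ j ∧ j < r
  · rw [if_pos hc]
    rw [List.getD_eq_getElem?_getD]
    rw [List.getElem?_append_left (by simp; omega)]
    rw [List.getElem?_append_right (by rw [hta]; omega)]
    rw [hta]
    rw [List.getElem?_replicate]
    rw [if_pos (by omega)]
    rfl
  · rw [if_neg hc]
    by_cases hlt : j < l - 1
    · rw [List.getD_eq_getElem?_getD, List.getD_eq_getElem?_getD]
      rw [List.getElem?_append_left (by simp; omega)]
      rw [List.getElem?_append_left (by rw [hta]; omega)]
      rw [List.getElem?_take, if_pos (by omega)]
    · rw [List.getD_eq_getElem?_getD, List.getD_eq_getElem?_getD]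
      rw [List.getElem?_append_right (by simp; omega)]
      rw [List.getElem?_drop]
      simp only [List.length_append, hta, List.length_replicate]
      rw [show r.toNat + (j.toNat - ((l - 1).toNat + (r - l + 1).toNat)) = j.toNat by omega]

-- the clampIdx form of the slice assignment, under Pre_'s two admitted shapes
lemma pvSliceAssignC_get (b : List Int) (l r x j : Int)
    (h : (0 ≤ r ∧ r < l) ∨ (1 ≤ l ∧ l ≤ r ∧ r ≤ (b.length : Int)))
    (hj0 : 0 ≤ j) (hj : j < (b.length : Int)) :
    PySem.List.pyGetD
      (b.take (PySem.List.clampIdx b.length (l - 1)) ++ List.replicate (r - l + 1).toNat x ++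
        b.drop (max (PySem.List.clampIdx b.length (l - 1)) (PySem.List.clampIdx b.length r))) j 0
      = if l - 1 ≤ j ∧ j < r then x else PySem.List.pyGetD b j 0 := by
  rcases h with ⟨hr0, hrl⟩ | ⟨h1, h2, h3⟩
  · rw [max_eq_left (pvClampIdx_mono b.length r (l - 1) (by omega) (by omega))]
    rw [show (r - l + 1).toNat = 0 by omega]
    rw [List.replicate_zero, List.append_nil, List.take_append_drop]
    rw [if_neg (by omega)]
  · rw [pvClampIdx_eq_toNat b.length (l - 1) (by omega) (by omega),
        pvClampIdx_eq_toNat b.length r (by omega) (by omega),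
        max_eq_right (by omega)]
    exact pvSliceAssign_get b l r x j h1 h2 h3 hj0 hj

lemma pvSliceAssignC_length (b : List Int) (l r x : Int)
    (h : (0 ≤ r ∧ r < l) ∨ (1 ≤ l ∧ l ≤ r ∧ r ≤ (b.length : Int))) :
    (b.take (PySem.List.clampIdx b.length (l - 1)) ++ List.replicate (r - l + 1).toNat x ++
      b.drop (max (PySem.List.clampIdx b.length (l - 1)) (PySem.List.clampIdx b.length r))).length
      = b.length := by
  rcases h with ⟨hr0, hrl⟩ | ⟨h1, h2, h3⟩
  · rw [max_eq_left (pvClampIdx_mono b.length r (l - 1) (by omega) (by omega))]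
    rw [show (r - l + 1).toNat = 0 by omega]
    rw [List.replicate_zero, List.append_nil, List.take_append_drop]
  · rw [pvClampIdx_eq_toNat b.length (l - 1) (by omega) (by omega),
        pvClampIdx_eq_toNat b.length r (by omega) (by omega),
        max_eq_right (by omega)]
    exact pvSliceAssign_length b l r x h1 h2 h3

lemma pvOkCmd_elim (n : Int) (c : List Int) (h : pvOkCmd n c = true) :
    c ≠ [] ∧
    ((PySem.List.pyGetD c 0 0 = 1 ∨ PySem.List.pyGetD c 0 0 = 2 ∨ PySem.List.pyGetD c 0 0 = 3 ∨
        PySem.List.pyGetD c 0 0 = 4) →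
      3 ≤ c.length ∧
      (PySem.List.pyGetD c 0 0 = 1 →
        1 ≤ PySem.List.pyGetD c 1 0 ∧ PySem.List.pyGetD c 1 0 ≤ n) ∧
      (PySem.List.pyGetD c 0 0 = 2 →
        PySem.List.pyGetD c 2 0 < PySem.List.pyGetD c 1 0 ∨
          (1 ≤ PySem.List.pyGetD c 1 0 ∧ PySem.List.pyGetD c 1 0 ≤ PySem.List.pyGetD c 2 0 ∧
            PySem.List.pyGetD c 2 0 ≤ n)) ∧
      ((PySem.List.pyGetD c 0 0 = 3 ∨ PySem.List.pyGetD c 0 0 = 4) →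
        (0 ≤ PySem.List.pyGetD c 2 0 ∧ PySem.List.pyGetD c 2 0 < PySem.List.pyGetD c 1 0) ∨
          (1 ≤ PySem.List.pyGetD c 1 0 ∧ PySem.List.pyGetD c 1 0 ≤ PySem.List.pyGetD c 2 0 ∧
            PySem.List.pyGetD c 2 0 ≤ n))) :=
  of_decide_eq_true h

lemma pvStepA_eq1 (b c : List Int) (h : PySem.List.pyGetD c 0 0 = 1) :
    pvStepA b c = PySem.List.pySetD b (PySem.List.pyGetD c 1 0 - 1) (PySem.List.pyGetD c 2 0) := by
  unfold pvStepA; rw [h]; norm_num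

lemma pvStepA_eq2 (b c : List Int) (h : PySem.List.pyGetD c 0 0 = 2) :
    pvStepA b c =
      (PySem.List.pyRange (PySem.List.pyGetD c 1 0 - 1) (PySem.List.pyGetD c 2 0) 1).foldl
        pvToggleStep b := by
  unfold pvStepA; rw [h]; norm_num

lemma pvStepA_eq3 (b c : List Int) (h : PySem.List.pyGetD c 0 0 = 3) :
    pvStepA b c =
      b.take (PySem.List.clampIdx b.length (PySem.List.pyGetD c 1 0 - 1)) ++
        List.replicate (PySem.List.pyGetD c 2 0 - PySem.List.pyGetD c 1 0 + 1).toNat 0 ++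
        b.drop (max (PySem.List.clampIdx b.length (PySem.List.pyGetD c 1 0 - 1))
          (PySem.List.clampIdx b.length (PySem.List.pyGetD c 2 0))) := by
  unfold pvStepA; rw [h]; norm_num

lemma pvStepA_eq4 (b c : List Int) (h : PySem.List.pyGetD c 0 0 = 4) :
    pvStepA b c =
      b.take (PySem.List.clampIdx b.length (PySem.List.pyGetD c 1 0 - 1)) ++
        List.replicate (PySem.List.pyGetD c 2 0 - PySem.List.pyGetD c 1 0 + 1).toNat 1 ++
        b.drop (max (PySem.List.clampIdx b.length (PySem.List.pyGetD c 1 0 - 1))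
          (PySem.List.clampIdx b.length (PySem.List.pyGetD c 2 0))) := by
  unfold pvStepA; rw [h]; norm_num

lemma pvStepA_noop (b c : List Int) (h1 : PySem.List.pyGetD c 0 0 ≠ 1)
    (h2 : PySem.List.pyGetD c 0 0 ≠ 2) (h3 : PySem.List.pyGetD c 0 0 ≠ 3)
    (h4 : PySem.List.pyGetD c 0 0 ≠ 4) : pvStepA b c = b := by
  unfold pvStepA; simp [h1, h2, h3, h4]

lemma pvStepA_get (b c : List Int) (hok : pvOkCmd (b.length : Int) c = true)
    (j : Int) (hj0 : 0 ≤ j) (hj : j < (b.length : Int)) :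
    PySem.List.pyGetD (pvStepA b c) j 0 =
      if PySem.List.pyGetD c 0 0 = 1 ∧ PySem.List.pyGetD c 1 0 - 1 = j then
        PySem.List.pyGetD c 2 0
      else if PySem.List.pyGetD c 0 0 = 2 ∧ PySem.List.pyGetD c 1 0 - 1 ≤ j ∧
          j < PySem.List.pyGetD c 2 0 then pvToggle (PySem.List.pyGetD b j 0)
      else if (PySem.List.pyGetD c 0 0 = 3 ∨ PySem.List.pyGetD c 0 0 = 4) ∧
          PySem.List.pyGetD c 1 0 - 1 ≤ j ∧ j < PySem.List.pyGetD c 2 0 then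
        PySem.List.pyGetD c 0 0 - 3
      else PySem.List.pyGetD b j 0 := by
  have hokP := pvOkCmd_elim _ c hok
  by_cases ht1 : PySem.List.pyGetD c 0 0 = 1
  · obtain ⟨hll, hln⟩ := (hokP.2 (Or.inl ht1)).2.1 ht1
    rw [pvStepA_eq1 b c ht1, pvSet_get b _ j _ (by omega) hj0 hj]
    by_cases hcj : PySem.List.pyGetD c 1 0 - 1 = j
    · rw [if_pos (by omega : j = PySem.List.pyGetD c 1 0 - 1), if_pos ⟨ht1, hcj⟩]
    · rw [if_neg (by omega : ¬ j = PySem.List.pyGetD c 1 0 - 1), if_neg (fun h => hcj h.2),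
          if_neg (by rintro ⟨h, -⟩; rw [ht1] at h; norm_num at h),
          if_neg (by rintro ⟨h, -⟩; rcases h with h | h <;> rw [ht1] at h <;> norm_num at h)]
  · by_cases ht2 : PySem.List.pyGetD c 0 0 = 2
    · have h2 := (hokP.2 (Or.inr (Or.inl ht2))).2.2.1 ht2
      rw [pvStepA_eq2 b c ht2, if_neg (fun h => ht1 h.1)]
      rcases h2 with hrl | ⟨h1, hlr, hrn⟩
      · rw [PySem.List.pyRange_one_eq_nil (by omega), List.foldl_nil,
            if_neg (by rintro ⟨-, hA, hB⟩; omega),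
            if_neg (by rintro ⟨h, -⟩; rcases h with h | h <;> rw [ht2] at h <;> norm_num at h)]
      · rw [pvToggleRange_get b _ _ j (by omega) hrn hj0 hj]
        by_cases hc : PySem.List.pyGetD c 1 0 - 1 ≤ j ∧ j < PySem.List.pyGetD c 2 0
        · rw [if_pos hc, if_pos ⟨ht2, hc⟩]
        · rw [if_neg hc, if_neg (fun h => hc h.2), if_neg (fun h => hc h.2)]
    · by_cases ht34 : PySem.List.pyGetD c 0 0 = 3 ∨ PySem.List.pyGetD c 0 0 = 4
      · have hbounds := (hokP.2 (Or.inr (Or.inr ht34))).2.2.2 ht34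
        rw [if_neg (fun h => ht1 h.1), if_neg (fun h => ht2 h.1)]
        rcases ht34 with ht3 | ht4
        · rw [pvStepA_eq3 b c ht3, pvSliceAssignC_get b _ _ 0 j hbounds hj0 hj]
          by_cases hc : PySem.List.pyGetD c 1 0 - 1 ≤ j ∧ j < PySem.List.pyGetD c 2 0
          · rw [if_pos hc, if_pos ⟨Or.inl ht3, hc⟩, ht3]
            norm_num
          · rw [if_neg hc, if_neg (fun h => hc h.2)]
        · rw [pvStepA_eq4 b c ht4, pvSliceAssignC_get b _ _ 1 j hbounds hj0 hj]
          by_cases hc : PySem.List.pyGetD c 1 0 - 1 ≤ j ∧ j < PySem.List.pyGetD c 2 0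
          · rw [if_pos hc, if_pos ⟨Or.inr ht4, hc⟩, ht4]
            norm_num
          · rw [if_neg hc, if_neg (fun h => hc h.2)]
      · rw [pvStepA_noop b c ht1 ht2 (fun h => ht34 (Or.inl h)) (fun h => ht34 (Or.inr h))]
        rw [if_neg (fun h => ht1 h.1), if_neg (fun h => ht2 h.1),
            if_neg (fun h => ht34 h.1)]

lemma pvStepA_length (b c : List Int) (hok : pvOkCmd (b.length : Int) c = true) :
    (pvStepA b c).length = b.length := by
  have hokP := pvOkCmd_elim _ c hok
  by_cases ht1 : PySem.List.pyGetD c 0 0 = 1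
  · rw [pvStepA_eq1 b c ht1, PySem.List.length_pySetD]
  · by_cases ht2 : PySem.List.pyGetD c 0 0 = 2
    · rw [pvStepA_eq2 b c ht2, pvFoldToggle_length]
    · by_cases ht3 : PySem.List.pyGetD c 0 0 = 3
      · rw [pvStepA_eq3 b c ht3]
        exact pvSliceAssignC_length b _ _ 0 ((hokP.2 (Or.inr (Or.inr (Or.inl ht3)))).2.2.2 (Or.inl ht3))
      · by_cases ht4 : PySem.List.pyGetD c 0 0 = 4
        · rw [pvStepA_eq4 b c ht4]
          exact pvSliceAssignC_length b _ _ 1 ((hokP.2 (Or.inr (Or.inr (Or.inr ht4)))).2.2.2 (Or.inr ht4))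
        · rw [pvStepA_noop b c ht1 ht2 ht3 ht4]

lemma pvFold_length (cmds : List (List Int)) (bulb : List Int)
    (hok : ∀ c ∈ cmds, pvOkCmd (bulb.length : Int) c = true) :
    (cmds.foldl pvStepA bulb).length = bulb.length := by
  induction cmds generalizing bulb with
  | nil => rfl
  | cons c cs ih =>
    have h1 := pvStepA_length bulb c (hok c (by simp))
    have hcast : ((pvStepA bulb c).length : Int) = (bulb.length : Int) := by exact_mod_cast h1
    simp only [List.foldl_cons]
    rw [ih (pvStepA bulb c) (fun d hd => by rw [hcast]; exact hok d (by simp [hd]))]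
    exact h1

lemma pvAdjust_zero (v : Int) : pvAdjust v 0 = v := by
  unfold pvAdjust
  rw [if_neg (by rintro ⟨h, -⟩; revert h; decide)]

lemma pvAdjust_one (v : Int) : pvAdjust v 1 = pvToggle v := by
  by_cases h1 : v = 1
  · subst h1; decide
  · by_cases h0 : v = 0
    · subst h0; decide
    · unfold pvAdjust pvToggle
      rw [if_neg (by rintro ⟨-, h⟩; rcases h with h | h; exact h0 h; exact h1 h),
          if_neg h1, if_neg h0]

lemma pvAdjust_succ (v f : Int) : pvAdjust v (f + 1) = pvAdjust (pvAdjust v 1) f := by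
  by_cases hv : v = 0 ∨ v = 1
  · have h1 : pvAdjust v 1 = 1 - v := by
      unfold pvAdjust; rw [if_pos ⟨by decide, hv⟩]
    rw [h1]
    unfold pvAdjust
    have hm : PySem.Int.mod (f + 1) 2 = 1 ↔ ¬ (PySem.Int.mod f 2 = 1) := by
      rw [PySem.Int.mod_eq_emod_of_pos (by norm_num), PySem.Int.mod_eq_emod_of_pos (by norm_num)]
      omega
    by_cases hf : PySem.Int.mod f 2 = 1
    · rw [if_neg (by rintro ⟨h, -⟩; exact (hm.mp h) hf),
          if_pos ⟨hf, by rcases hv with h | h <;> subst h <;> norm_num⟩]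
      ring
    · rw [if_pos ⟨hm.mpr hf, hv⟩, if_neg (by rintro ⟨h, -⟩; exact hf h)]
  · have h1 : pvAdjust v 1 = v := by
      unfold pvAdjust; rw [if_neg (by rintro ⟨-, h⟩; exact hv h)]
    rw [h1]
    unfold pvAdjust
    rw [if_neg (by rintro ⟨-, h⟩; exact hv h), if_neg (by rintro ⟨-, h⟩; exact hv h)]

lemma pvValueAt_shift (bulb : List Int) (j : Int) (rev : List (List Int)) (f : Int) :
    pvValueAt bulb j rev f = pvAdjust (pvValueAt bulb j rev 0) f := by
  induction rev generalizing f with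
  | nil =>
    simp only [pvValueAt]
    rw [pvAdjust_zero]
  | cons c rest ih =>
    simp only [pvValueAt]
    split_ifs with h1 h2 h3
    · rw [pvAdjust_zero]
    · rw [ih (f + 1), ih (0 + 1), pvAdjust_succ, pvAdjust_succ, pvAdjust_zero]
    · rw [pvAdjust_zero]
    · exact ih f

lemma pvMain (cmds : List (List Int)) (bulb : List Int) (j : Int) (hj0 : 0 ≤ j)
    (hj : j < (bulb.length : Int)) :
    ∀ (_hok : ∀ c ∈ cmds, pvOkCmd (bulb.length : Int) c = true),
    pvValueAt bulb j cmds.reverse 0 = PySem.List.pyGetD (cmds.foldl pvStepA bulb) j 0 := by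
  induction cmds using List.reverseRecOn with
  | nil =>
    intro _hok
    simp only [List.reverse_nil, pvValueAt, List.foldl_nil]
    rw [pvAdjust_zero]
  | append_singleton init c ih =>
    intro hok
    have hokc := hok c (by simp)
    have hoki : ∀ d ∈ init, pvOkCmd (bulb.length : Int) d = true := fun d hd => hok d (by simp [hd])
    have hlen : (init.foldl pvStepA bulb).length = bulb.length := pvFold_length init bulb hoki
    have hcast : ((init.foldl pvStepA bulb).length : Int) = (bulb.length : Int) := by
      exact_mod_cast hlen
    have hokcL : pvOkCmd ((init.foldl pvStepA bulb).length : Int) c = true := by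
      rw [hcast]; exact hokc
    rw [List.foldl_append]
    simp only [List.foldl_cons, List.foldl_nil]
    rw [pvStepA_get (init.foldl pvStepA bulb) c hokcL j hj0 (by rw [hcast]; exact hj)]
    rw [show (init ++ [c]).reverse = c :: init.reverse by simp]
    simp only [pvValueAt]
    by_cases hc1 : PySem.List.pyGetD c 0 0 = 1 ∧ PySem.List.pyGetD c 1 0 - 1 = j
    · rw [if_pos hc1, if_pos hc1, pvAdjust_zero]
    · rw [if_neg hc1, if_neg hc1]
      by_cases hc2 : PySem.List.pyGetD c 0 0 = 2 ∧ PySem.List.pyGetD c 1 0 - 1 ≤ j ∧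
          j < PySem.List.pyGetD c 2 0
      · rw [if_pos hc2, if_pos hc2]
        rw [pvValueAt_shift bulb j init.reverse (0 + 1), ih hoki]
        rw [show (0 : Int) + 1 = 1 by norm_num, pvAdjust_one]
      · rw [if_neg hc2, if_neg hc2]
        by_cases hc3 : (PySem.List.pyGetD c 0 0 = 3 ∨ PySem.List.pyGetD c 0 0 = 4) ∧
            PySem.List.pyGetD c 1 0 - 1 ≤ j ∧ j < PySem.List.pyGetD c 2 0
        · rw [if_pos hc3, if_pos hc3, pvAdjust_zero]
        · rw [if_neg hc3, if_neg hc3]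
          exact ih hoki

-- ===== VERDICT (by name: the statement is the Claim_ definition above) =====
theorem get_final_bulb_state_spec : Claim_equal_get_final_bulb_state := by
  unfold Claim_equal_get_final_bulb_state
  intro cmds bulb hdom hpre
  unfold Spec_get_final_bulb_state
  unfold Pre_get_final_bulb_state at hpre
  simp only [List.all_eq_true] at hpre
  unfold get_final_bulb_state get_final_bulb_state_alt
  rw [PySem.List.slice?_none_none_neg_one]
  simp only [Option.getD_some]
  have hmap : (PySem.List.pyRange 0 (bulb.length : Int) 1).map (fun j => pvValueAt bulb j cmds.reverse 0)
      = (PySem.List.pyRange 0 (bulb.length : Int) 1).map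
          (fun j => PySem.List.pyGetD (cmds.foldl pvStepA bulb) j 0) := by
    refine List.map_congr_left (fun j hjmem => ?_)
    obtain ⟨hj0, hjlt⟩ := PySem.List.mem_pyRange_one.mp hjmem
    exact pvMain cmds bulb j hj0 hjlt hpre
  rw [hmap]
  have hlen : ((cmds.foldl pvStepA bulb).length : Int) = (bulb.length : Int) := by
    exact_mod_cast pvFold_length cmds bulb hpre
  rw [← hlen, PySem.List.map_pyGetD_pyRange_zero']
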